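-- pv_equiv track=rewrite | github.com/juandarr/ProjectEuler | 122.py | minimum_products
-- ===== SOURCE A (Python) =====
-- def minimum_products(limit_n):
--     '''
--     returns the sum of all minimum number of multiplications to compute n^k for k>=1 and k<=200
--     '''
--     ar = [[1]]
--     k = [i for i in range(2,limit_n+1)]
--     m = {}
--     for val in k:
--         m[val]=float('inf')
--     l = 1
--     mini = 0
--     while len(k)>0:
--         tmp = []
--         for i in ar:
--             pivot = i[-1]
--             completed = False
--             for j in i[::-1]:
--                 tmp.append(i+[pivot+j])
--                 if pivot+j<=limit_n:
--                     if m[pivot+j]>l: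
--                         m[pivot+j]=l
--                         k.remove(pivot+j)
--                         if len(k)==0:
--                             completed = True
--                             break
--             if completed:
--                 break
--         l +=1
--         ar = tmp
--     total = 0
--     for key in m:
--         total += m[key]
--     return total
-- ===== SOURCE B (Python) =====
-- def minimum_products(limit_n):
--     '''
--     returns the sum of all minimum number of multiplications to compute n^k for k>=1 and k<=limit_n
--     '''
--     total = 0
--     for n in range(2, limit_n + 1):
--         total += _star_chain_length(n)
--     return total
--
--
-- def _dfs(chain, last, depth_left, n):
--     # chain is stored most-recent-first, so chain[0] == last
--     if last == n:
--         return True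
--     if depth_left == 0:
--         return False
--     if (last << depth_left) < n:  # even doubling every step cannot reach n
--         return False
--     for j in chain:
--         nxt = last + j
--         if nxt <= n and _dfs([nxt] + chain, nxt, depth_left - 1, n):
--             return True
--     return False
--
--
-- def _star_chain_length(n):
--     # iterative-deepening DFS over star addition chains starting from [1]
--     bound = 1
--     while not _dfs([1], 1, bound, n):
--         bound += 1
--     return bound
-- ===== Notes on version B (the rewrite author's own statement) =====
-- stated objective: faster
-- what changed: A runs a breadth-first search that materializes the entire level-by-level list of ALL star addition chains (a factorially growing frontier) and marks targets as levels complete; B instead computes each target's minimal star-chain length independently by iterative-deepening DFS that stores a single path and prunes branches whose repeated doubling cannot reach the target, then sums the lengths.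
import Mathlib
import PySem

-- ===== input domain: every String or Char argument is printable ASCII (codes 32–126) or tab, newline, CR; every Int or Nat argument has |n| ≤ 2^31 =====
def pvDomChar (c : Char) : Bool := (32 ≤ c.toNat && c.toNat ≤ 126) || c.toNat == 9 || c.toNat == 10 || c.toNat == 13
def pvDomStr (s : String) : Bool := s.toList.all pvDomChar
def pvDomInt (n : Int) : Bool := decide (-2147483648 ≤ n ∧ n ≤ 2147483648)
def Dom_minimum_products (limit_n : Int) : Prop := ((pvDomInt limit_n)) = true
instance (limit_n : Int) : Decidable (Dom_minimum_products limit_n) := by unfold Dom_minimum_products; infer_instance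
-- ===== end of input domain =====

-- B replaces A's breadth-first search that materializes every star addition chain level by level
-- with a per-target iterative-deepening DFS that stores a single path and prunes by repeated doubling.

-- ===== PORT A =====
-- Chains are stored most-recent-first (Python stores them oldest-first): under this reversal
-- Python's i[-1] is the head, iterating i[::-1] is iterating the list itself, and appending
-- i+[pivot+j] is consing (pivot+j) — the traversal order and every value are exactly Python's.
-- m maps each key to Option Int: `none` is the initial float('inf') (so `m[v] > l` is true on
-- `none`), `some x` a stored int level.

-- the inner `for j in i[::-1]` loop, with its `completed` early break.
-- tmp is accumulated most-recent-first (cons instead of Python's O(1) append) and reversed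
-- once per level in loopA, so ar is exactly the list Python builds by tmp.append(...).
def innerA (limit_n l pivot : Int) (iorig : List Int) (js : List Int)
    (tmp : List (List Int)) (m : PySem.Dict Int (Option Int)) (k : List Int) :
    List (List Int) × PySem.Dict Int (Option Int) × List Int × Bool :=
  match js with
  | [] => (tmp, m, k, false)
  | j :: rest =>
    let v := pivot + j
    let tmp' := (v :: iorig) :: tmp
    if v ≤ limit_n then
      let big : Bool :=
        match PySem.Dict.get? m v with
        | some none => true            -- m[v] = float('inf') and inf > l
        | some (some x) => decide (l < x)
        | none => false                -- Python would raise KeyError; unreachable (2 ≤ v ≤ limit_n)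
      if big then
        let m' := PySem.Dict.insert m v (some l)
        let k' := (PySem.List.remove? k v).getD k
        if k' = [] then (tmp', m', k', true)
        else innerA limit_n l pivot iorig rest tmp' m' k'
      else innerA limit_n l pivot iorig rest tmp' m k
    else innerA limit_n l pivot iorig rest tmp' m k

-- the outer `for i in ar` loop, with its `if completed: break`
def outerA (limit_n l : Int) (ar : List (List Int))
    (tmp : List (List Int)) (m : PySem.Dict Int (Option Int)) (k : List Int) :
    List (List Int) × PySem.Dict Int (Option Int) × List Int :=
  match ar with
  | [] => (tmp, m, k)
  | i :: rest =>
    let pivot := i.headD 0             -- i[-1]; chains are never empty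
    match innerA limit_n l pivot i i tmp m k with
    | (tmp', m', k', completed) =>
      if completed then (tmp', m', k')
      else outerA limit_n l rest tmp' m' k'

-- the `while len(k)>0` loop; the fuel only makes it total: limit_n.toNat iterations always
-- suffice (every key is found by level limit_n - 1), proved in the lemmas below
def loopA (fuel : Nat) (limit_n l : Int) (ar : List (List Int))
    (m : PySem.Dict Int (Option Int)) (k : List Int) : PySem.Dict Int (Option Int) :=
  match fuel with
  | 0 => m
  | f + 1 =>
    if k = [] then m
    else
      match outerA limit_n l ar [] m k with
      | (tmp, m', k') => loopA f limit_n (l + 1) tmp.reverse m' k'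

def minimum_products (limit_n : Int) : Int :=
  let kinit := PySem.List.pyRange 2 (limit_n + 1) 1
  let m0 := kinit.foldl (fun d v => PySem.Dict.insert d v (none : Option Int)) PySem.Dict.empty
  let mfin := loopA limit_n.toNat limit_n 1 [[1]] m0 kinit
  mfin.items.foldl (fun acc p => acc + p.2.getD 0) 0   -- values are always `some`; getD 0 unreachable

-- ===== PORT B =====
-- chain is stored most-recent-first in Source B as well, so chain[0] == last
def dfsB (n : Int) (depthLeft : Nat) (chain : List Int) (last : Int) : Bool :=
  if last = n then true
  else
    match depthLeft with
    | 0 => false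
    | d + 1 =>
      if last <<< (d + 1) < n then false   -- even doubling every step cannot reach n
      else chain.any (fun j =>
        decide (last + j ≤ n) && dfsB n d ((last + j) :: chain) (last + j))
termination_by depthLeft

-- the `while not _dfs(...)` loop of _star_chain_length; fuel n.toNat only makes it total:
-- the search succeeds at bound ≤ n - 1 (proved below)
def searchB (n : Int) (fuel : Nat) (bound : Nat) : Int :=
  match fuel with
  | 0 => (bound : Int)
  | f + 1 =>
    if dfsB n bound [1] 1 then (bound : Int)
    else searchB n f (bound + 1)

def minimum_products_alt (limit_n : Int) : Int :=
  (PySem.List.pyRange 2 (limit_n + 1) 1).foldl (fun acc n => acc + searchB n n.toNat 1) 0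

-- ===== PRECONDITION & SPEC =====
def Spec_minimum_products (limit_n : Int) (out : Int) : Prop := out = minimum_products_alt limit_n
instance (limit_n : Int) (out : Int) : Decidable (Spec_minimum_products limit_n out) := by unfold Spec_minimum_products; infer_instance

-- ===== CLAIM (what is proved, stated in full; the proofs are below) =====
def Claim_equal_minimum_products : Prop := ∀ (limit_n : Int), Dom_minimum_products limit_n → Spec_minimum_products limit_n (minimum_products limit_n)

-- ===== LEMMAS AND PROOFS =====

-- A star addition chain, stored most-recent-first; both programs search exactly these.
inductive SChain : List Int → Prop
  | base : SChain [1]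
  | step {c : List Int} {j : Int} : SChain c → j ∈ c → SChain ((c.headD 0 + j) :: c)

-- the level expansion A performs: all one-step extensions of all chains, in A's order
def expandA (ar : List (List Int)) : List (List Int) :=
  ar.flatMap (fun i => i.map (fun j => (i.headD 0 + j) :: i))

def levels : Nat → List (List Int)
  | 0 => [[1]]
  | l + 1 => expandA (levels l)

def HasChain (n : Int) (l : Nat) : Prop := ∃ c, SChain c ∧ c.length = l + 1 ∧ c.headD 0 = n

def hasChainB (n : Int) (l : Nat) : Bool := (levels l).any (fun c => c.headD 0 == n)

-- minimal star-chain length (proof-side mirror of what both programs compute)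
def Lfun (n : Int) : Nat := (((List.range n.toNat).find? (fun l => hasChainB n l)).getD 0)

theorem star_ne_nil {c : List Int} (h : SChain c) : c ≠ [] := by
  cases h <;> simp

theorem star_head_mem {c : List Int} (h : SChain c) : c.headD 0 ∈ c := by
  cases h <;> simp

theorem star_pos {c : List Int} (h : SChain c) : ∀ x ∈ c, 1 ≤ x := by
  induction h with
  | base => simp
  | @step c j hc hj ih =>
    intro x hx
    rcases List.mem_cons.1 hx with rfl | hx
    · have h1 := ih _ (star_head_mem hc)
      have h2 := ih _ hj
      omega
    · exact ih _ hx

theorem star_le_head {c : List Int} (h : SChain c) : ∀ x ∈ c, x ≤ c.headD 0 := by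
  induction h with
  | base => simp
  | @step c j hc hj ih =>
    intro x hx
    have hj1 := star_pos hc _ hj
    rcases List.mem_cons.1 hx with rfl | hx
    · simp
    · have := ih _ hx
      simp only [List.headD_cons]
      omega

theorem star_one_mem {c : List Int} (h : SChain c) : (1 : Int) ∈ c := by
  induction h with
  | base => simp
  | step _ _ ih => exact List.mem_cons_of_mem _ ih

theorem star_ends_one {c : List Int} (h : SChain c) : ∃ e, c = e ++ [1] := by
  induction h with
  | base => exact ⟨[], rfl⟩
  | @step c j _ _ ih =>
    obtain ⟨e, rfl⟩ := ih
    exact ⟨_ :: e, rfl⟩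

theorem mem_expandA {c : List Int} {ar : List (List Int)} :
    c ∈ expandA ar ↔ ∃ i ∈ ar, ∃ j ∈ i, c = (i.headD 0 + j) :: i := by
  simp [expandA, eq_comm]

theorem mem_levels {c : List Int} {l : Nat} : c ∈ levels l ↔ SChain c ∧ c.length = l + 1 := by
  induction l generalizing c with
  | zero =>
    constructor
    · rintro h
      simp only [levels] at h
      simp only [List.mem_singleton] at h
      subst h
      exact ⟨SChain.base, rfl⟩
    · rintro ⟨hs, hl⟩
      cases hs with
      | base => simp [levels]
      | @step c j hc hj =>
        simp at hl
        subst hl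
        simp at hj
  | succ l ih =>
    constructor
    · intro h
      rw [levels, mem_expandA] at h
      obtain ⟨i, hi, j, hj, rfl⟩ := h
      obtain ⟨hsi, hli⟩ := ih.1 hi
      exact ⟨SChain.step hsi hj, by simp [hli]⟩
    · rintro ⟨hs, hl⟩
      cases hs with
      | base => simp at hl
      | @step c j hc hj =>
        rw [levels, mem_expandA]
        refine ⟨c, ih.2 ⟨hc, ?_⟩, j, hj, rfl⟩
        simpa using hl

theorem hasChainB_iff {n : Int} {l : Nat} : hasChainB n l = true ↔ HasChain n l := by
  simp only [hasChainB, List.any_eq_true, beq_iff_eq, HasChain, mem_levels]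
  constructor
  · rintro ⟨c, ⟨hs, hl⟩, hh⟩; exact ⟨c, hs, hl, hh⟩
  · rintro ⟨c, hs, hl, hh⟩; exact ⟨c, ⟨hs, hl⟩, hh⟩

theorem find?_range_min {m a : Nat} {p : Nat → Bool} (h : (List.range m).find? p = some a) :
    ∀ b < a, ¬ p b := by
  rw [List.find?_eq_some_iff_append] at h
  obtain ⟨hp, as, bs, hsplit, hnone⟩ := h
  intro b hb hpb
  have hbmem : b ∈ as := by
    have hbr : b ∈ List.range m := by
      have ha : a ∈ List.range m := by
        rw [hsplit]; exact List.mem_append_right _ (List.mem_cons_self)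
      simp at ha ⊢; omega
    rw [hsplit] at hbr
    rcases List.mem_append.1 hbr with h1 | h1
    · exact h1
    · rcases List.mem_cons.1 h1 with rfl | h1
      · omega
      · exfalso
        have hpw : (List.range m).Pairwise (· < ·) := List.pairwise_lt_range
        rw [hsplit] at hpw
        have := (List.pairwise_append.mp hpw).2.1
        have hab := (List.pairwise_cons.mp this).1 b h1
        omega
  exact absurd hpb (by simpa using hnone b hbmem)

theorem hasChain_ladder_nat : ∀ m : Nat, 1 ≤ m → HasChain (m : Int) (m - 1) := by
  intro m
  induction m with
  | zero => omega
  | succ m ih =>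
    intro _
    by_cases hm : m = 0
    · subst hm
      exact ⟨[1], SChain.base, by simp, by simp⟩
    · obtain ⟨c, hs, hl, hh⟩ := ih (by omega)
      refine ⟨(c.headD 0 + 1) :: c, SChain.step hs (star_one_mem hs), by simp [hl]; omega, ?_⟩
      rw [List.headD_cons, hh]
      push_cast
      omega

theorem hasChain_ladder {n : Int} (h : 1 ≤ n) : HasChain n (n.toNat - 1) := by
  have := hasChain_ladder_nat n.toNat (by omega)
  rwa [Int.toNat_of_nonneg (by omega)] at this

theorem Lfun_hasChain {n : Int} (h : 1 ≤ n) : HasChain n (Lfun n) := by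
  have hex : ∃ x ∈ List.range n.toNat, hasChainB n x := by
    refine ⟨n.toNat - 1, by simp; omega, hasChainB_iff.2 (hasChain_ladder h)⟩
  have hsome := List.find?_isSome.2 hex
  obtain ⟨a, ha⟩ := Option.isSome_iff_exists.1 hsome
  have := List.find?_some ha
  rw [Lfun, ha]
  exact hasChainB_iff.1 this

theorem Lfun_min {n : Int} {l : Nat} (h : HasChain n l) : Lfun n ≤ l := by
  rw [Lfun]
  cases hf : (List.range n.toNat).find? (fun l => hasChainB n l) with
  | none => simp
  | some a =>
    simp only [Option.getD_some]
    by_contra hlt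
    exact find?_range_min hf l (by omega) (hasChainB_iff.2 h)

theorem Lfun_le {n : Int} (h : 1 ≤ n) : Lfun n ≤ n.toNat - 1 := Lfun_min (hasChain_ladder h)

theorem Lfun_pos {n : Int} (h : 2 ≤ n) : 1 ≤ Lfun n := by
  by_contra h0
  have hc := Lfun_hasChain (by omega : (1:Int) ≤ n)
  have hz : Lfun n = 0 := by omega
  rw [hz] at hc
  obtain ⟨c, hs, hl, hh⟩ := hc
  have : c ∈ levels 0 := mem_levels.2 ⟨hs, hl⟩
  simp [levels] at this
  subst this
  simp at hh
  omega

-- ## B-side: what dfsB decides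
inductive ReachIn (n : Int) : Nat → List Int → Prop
  | done (d : Nat) (c : List Int) : c.headD 0 = n → ReachIn n d c
  | step (d : Nat) (c : List Int) (j : Int) : j ∈ c → c.headD 0 + j ≤ n →
      ReachIn n d ((c.headD 0 + j) :: c) → ReachIn n (d + 1) c

theorem reach_head_bound {n : Int} {d : Nat} {c : List Int} (h : ReachIn n d c) (hs : SChain c) :
    n ≤ c.headD 0 * 2 ^ d := by
  revert hs
  induction h with
  | done d c hh =>
    intro hs
    have h1 : 1 ≤ c.headD 0 := star_pos hs _ (star_head_mem hs)
    have h2 : (1 : Int) ≤ 2 ^ d := one_le_pow₀ (by norm_num)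
    nlinarith
  | step d c j hj hle _ ih =>
    intro hs
    have hstep := ih (SChain.step hs hj)
    simp only [List.headD_cons] at hstep
    have hjh : j ≤ c.headD 0 := star_le_head hs _ hj
    have hp : (0 : Int) ≤ 2 ^ d := by positivity
    have : (c.headD 0 + j) * 2 ^ d ≤ c.headD 0 * 2 ^ (d + 1) := by
      rw [pow_succ]
      nlinarith
    omega

theorem dfsB_iff_reach {n : Int} (d : Nat) (c : List Int) (hs : SChain c)
    (hle : ∀ x ∈ c, x ≤ n) : (dfsB n d c (c.headD 0) = true ↔ ReachIn n d c) := by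
  induction d generalizing c with
  | zero =>
    rw [dfsB]
    by_cases hh : c.headD 0 = n
    · rw [if_pos hh]
      exact iff_of_true rfl (ReachIn.done _ _ hh)
    · rw [if_neg hh]
      show false = true ↔ ReachIn n 0 c
      refine iff_of_false Bool.false_ne_true ?_
      intro hr
      cases hr with
      | done _ _ h => exact hh h
  | succ d ih =>
    rw [dfsB]
    by_cases hh : c.headD 0 = n
    · rw [if_pos hh]
      exact iff_of_true rfl (ReachIn.done _ _ hh)
    · rw [if_neg hh]
      show (if c.headD 0 <<< (d + 1) < n  then false
          else c.any fun j =>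
            decide (c.headD 0 + j ≤ n) && dfsB n d ((c.headD 0 + j) :: c) (c.headD 0 + j)) = true ↔ ReachIn n (d + 1) c
      by_cases hpr : c.headD 0 <<< (d + 1) < n
      · rw [if_pos hpr]
        refine iff_of_false Bool.false_ne_true ?_
        intro hr
        have := reach_head_bound hr hs
        rw [Int.shiftLeft_eq] at hpr
        omega
      · rw [if_neg hpr, List.any_eq_true]
        constructor
        · rintro ⟨j, hj, hcond⟩
          rw [Bool.and_eq_true, decide_eq_true_eq] at hcond
          obtain ⟨hjn, hrec⟩ := hcond
          refine ReachIn.step _ _ j hj hjn ?_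
          have hs' : SChain ((c.headD 0 + j) :: c) := SChain.step hs hj
          have hle' : ∀ x ∈ (c.headD 0 + j) :: c, x ≤ n := by
            intro x hx
            rcases List.mem_cons.1 hx with rfl | hx
            · exact hjn
            · exact hle _ hx
          have hiff := (ih ((c.headD 0 + j) :: c) hs' hle')
          rw [List.headD_cons] at hiff
          exact hiff.1 hrec
        · intro hr
          cases hr with
          | done _ _ h => exact absurd h hh
          | step _ _ j hj hjn hrec =>
            refine ⟨j, hj, ?_⟩
            rw [Bool.and_eq_true, decide_eq_true_eq]
            refine ⟨hjn, ?_⟩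
            have hs' : SChain ((c.headD 0 + j) :: c) := SChain.step hs hj
            have hle' : ∀ x ∈ (c.headD 0 + j) :: c, x ≤ n := by
              intro x hx
              rcases List.mem_cons.1 hx with rfl | hx
              · exact hjn
              · exact hle _ hx
            have hiff := (ih ((c.headD 0 + j) :: c) hs' hle')
            rw [List.headD_cons] at hiff
            exact hiff.2 hrec

theorem star_suffix_step {c' c : List Int} {x : Int} (h : SChain c') (hc : c ≠ [])
    (hsuf : (x :: c) <:+ c') : ∃ j ∈ c, x = c.headD 0 + j := by
  induction h with
  | base =>
    exfalso
    have hl := hsuf.length_le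
    rw [List.length_cons, List.length_singleton] at hl
    exact hc (List.length_eq_zero_iff.1 (by omega))
  | @step c0 j0 hc0 hj0 ih =>
    rcases List.suffix_cons_iff.1 hsuf with heq | hsuf'
    · obtain ⟨rfl, rfl⟩ : x = c0.headD 0 + j0 ∧ c = c0 := by
        constructor <;> [exact (List.cons_eq_cons.1 heq).1; exact (List.cons_eq_cons.1 heq).2]
      exact ⟨j0, hj0, rfl⟩
    · exact ih hsuf' 

theorem reach_of_chain {n : Int} {d : Nat} {c c' : List Int} (hs' : SChain c') (hs : SChain c)
    (hsuf : c <:+ c') (hn : c'.headD 0 = n) (hd : c'.length ≤ c.length + d) : ReachIn n d c := by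
  obtain ⟨e, rfl⟩ := hsuf
  induction e using List.reverseRecOn generalizing c d with
  | nil =>
    rw [List.nil_append] at hn
    exact ReachIn.done _ _ hn
  | append_singleton e x ih =>
    have hxc : (x :: c) <:+ e ++ [x] ++ c := by
      rw [List.append_assoc, List.singleton_append]
      exact List.suffix_append e _
    obtain ⟨j, hj, rfl⟩ := star_suffix_step hs' (star_ne_nil hs) hxc
    have hs2 : SChain ((c.headD 0 + j) :: c) := SChain.step hs hj
    have hxn : c.headD 0 + j ≤ n := by
      rw [← hn]
      exact star_le_head hs' _ (hxc.mem (List.mem_cons_self))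
    cases d with
    | zero =>
      exfalso
      rw [List.append_assoc, List.singleton_append, List.length_append, List.length_cons] at hd
      omega
    | succ d =>
      refine ReachIn.step _ _ j hj hxn ?_
      rw [List.append_assoc, List.singleton_append] at hs' hn hd
      exact ih hs2 hs' hn (by simp at hd ⊢; omega)

theorem chain_of_reach {n : Int} {d : Nat} {c : List Int} (h : ReachIn n d c) (hs : SChain c) :
    ∃ e, SChain (e ++ c) ∧ (e ++ c).headD 0 = n ∧ e.length ≤ d := by
  revert hs
  induction h with
  | done d c hh => exact fun hs => ⟨[], by simpa using hs, by simpa using hh, by simp⟩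
  | step d c j hj hjn _ ih =>
    intro hs
    obtain ⟨e, hse, hhe, hle⟩ := ih (SChain.step hs hj)
    refine ⟨e ++ [c.headD 0 + j], ?_, ?_, ?_⟩
    · rwa [List.append_assoc, List.singleton_append]
    · rwa [List.append_assoc, List.singleton_append]
    · simp; omega

theorem dfsB_one_iff {n : Int} (hn : 1 ≤ n) (b : Nat) :
    (dfsB n b [1] 1 = true ↔ ∃ l ≤ b, HasChain n l) := by
  have h := dfsB_iff_reach (n := n) b [1] SChain.base (by simpa using hn)
  rw [List.headD_cons] at h
  rw [h]
  constructor
  · intro hr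
    obtain ⟨e, hse, hhe, hle⟩ := chain_of_reach hr SChain.base
    exact ⟨e.length, hle, ⟨e ++ [1], hse, by simp, hhe⟩⟩
  · rintro ⟨l, hlb, c, hsc, hlen, hh⟩
    obtain ⟨e, rfl⟩ := star_ends_one hsc
    refine reach_of_chain hsc SChain.base (List.suffix_append e [1]) hh ?_
    simp at hlen ⊢
    omega

theorem searchB_eq {n : Int} (hn : 2 ≤ n) :
    ∀ (fuel bound : Nat), bound ≤ Lfun n → Lfun n < bound + fuel →
      searchB n fuel bound = (Lfun n : Int) := by
  intro fuel
  induction fuel with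
  | zero => intro bound h1 h2; omega
  | succ f ih =>
    intro bound h1 h2
    rw [searchB]
    by_cases hd : dfsB n bound [1] 1 = true
    · obtain ⟨l, hlb, hlc⟩ := (dfsB_one_iff (by omega) bound).1 hd
      have := Lfun_min hlc
      rw [if_pos hd]
      have : bound = Lfun n := by omega
      rw [this]
    · rw [if_neg hd]
      have hne : bound ≠ Lfun n := by
        intro heq
        apply hd
        rw [heq]
        exact (dfsB_one_iff (by omega) _).2 ⟨Lfun n, le_refl _, Lfun_hasChain (by omega)⟩
      exact ih (bound + 1) (by omega) (by omega)

theorem searchB_Lfun {n : Int} (hn : 2 ≤ n) : searchB n n.toNat 1 = (Lfun n : Int) := by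
  have h1 := Lfun_pos hn
  have h2 := Lfun_le (by omega : (1:Int) ≤ n)
  exact searchB_eq hn n.toNat 1 h1 (by omega)

-- ## A-side: the BFS loop invariant
-- keysL limit = the Python list k = [2..limit]; F marks the values already assigned at the
-- current level t; mSpec/kSpec describe A's dict m and list k at that moment.
def keysL (limit : Int) : List Int := PySem.List.pyRange 2 (limit + 1) 1

def mval (t : Nat) (F : Int → Bool) (v : Int) : Option Int :=
  if Lfun v < t then some ((Lfun v : Nat) : Int) else if F v then some ((t : Nat) : Int) else none

def mSpec (limit : Int) (t : Nat) (F : Int → Bool) : PySem.Dict Int (Option Int) :=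
  PySem.Dict.mk ((keysL limit).map (fun v => (v, mval t F v)))

def kSpec (limit : Int) (t : Nat) (F : Int → Bool) : List Int :=
  (keysL limit).filter (fun v => !(decide (Lfun v < t)) && !(F v))

def mFinal (limit : Int) : PySem.Dict Int (Option Int) :=
  PySem.Dict.mk ((keysL limit).map (fun v => (v, some ((Lfun v : Nat) : Int))))

-- the set of values F picks up while the inner loop walks js (one chain i, pivot = i.headD 0)
def addF (limit : Int) (t : Nat) (pivot : Int) (js : List Int) (F : Int → Bool) : Int → Bool :=
  fun w => F w || (decide (w ∈ keysL limit) && !(decide (Lfun w < t)) && js.any (fun j => w == pivot + j))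

-- the set of values F picks up while the outer loop walks the chain list cs
def addFo (limit : Int) (t : Nat) (cs : List (List Int)) (F : Int → Bool) : Int → Bool :=
  fun w => F w || (decide (w ∈ keysL limit) && !(decide (Lfun w < t)) &&
    cs.any (fun i => i.any (fun j => w == i.headD 0 + j)))

theorem get?_mk_map (keys : List Int) (f : Int → Option Int) (v : Int) :
    (PySem.Dict.mk (keys.map (fun w => (w, f w)))).get? v
      = if v ∈ keys then some (f v) else none := by
  induction keys with
  | nil => simp [PySem.Dict.get?]
  | cons k ks ih =>
    rw [List.map_cons, PySem.Dict.get?_mk_cons]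
    by_cases hv : v = k
    · subst hv
      simp
    · rw [if_neg (by simpa using Ne.symm hv), ih]
      simp [hv]

theorem insert_mk_map (keys : List Int) (f : Int → Option Int) (v : Int) (val : Option Int)
    (hv : v ∈ keys) :
    (PySem.Dict.mk (keys.map (fun w => (w, f w)))).insert v val
      = PySem.Dict.mk (keys.map (fun w => (w, if w = v then val else f w))) := by
  have hc : (PySem.Dict.mk (keys.map (fun w => (w, f w)))).contains v := by
    rw [PySem.Dict.contains_iff_mem_keys, PySem.Dict.keys_mk, List.map_map]
    simpa using hv
  apply PySem.Dict.ext
  rw [PySem.Dict.items_insert_of_contains _ _ hc]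
  show (keys.map fun w => (w, f w)).map _ = _
  rw [List.map_map]
  apply List.map_congr_left
  intro w _
  by_cases hw : w = v
  · subst hw
    simp
  · simp [hw]

theorem mSpec_congr {limit : Int} {t : Nat} {F₁ F₂ : Int → Bool}
    (h : ∀ v ∈ keysL limit, F₁ v = F₂ v) : mSpec limit t F₁ = mSpec limit t F₂ := by
  unfold mSpec
  congr 1
  apply List.map_congr_left
  intro v hv
  rw [mval, mval, h v hv]

theorem kSpec_congr {limit : Int} {t : Nat} {F₁ F₂ : Int → Bool}
    (h : ∀ v ∈ keysL limit, F₁ v = F₂ v) : kSpec limit t F₁ = kSpec limit t F₂ := by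
  unfold kSpec
  apply List.filter_congr
  intro v hv
  rw [h v hv]

theorem mSpec_eq_final {limit : Int} {t : Nat} {F : Int → Bool}
    (hF : ∀ v, F v = true → Lfun v = t) (hk : kSpec limit t F = []) :
    mSpec limit t F = mFinal limit := by
  unfold mSpec mFinal
  congr 1
  apply List.map_congr_left
  intro v hv
  have hvk := List.filter_eq_nil_iff.1 hk v hv
  rw [mval]
  by_cases hlt : Lfun v < t
  · rw [if_pos hlt]
  · rw [if_neg hlt]
    by_cases hFv : F v = true
    · rw [if_pos hFv, hF v hFv]
    · exfalso
      have hF0 : F v = false := by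
        rcases Bool.eq_false_or_eq_true (F v) with h1 | h1
        · exact absurd h1 hFv
        · exact h1
      exact hvk (by simp [hlt, hF0])

theorem new_value_level {t : Nat} {i : List Int} (ht : 1 ≤ t)
    (hi : i ∈ levels (t - 1)) {j : Int} (hj : j ∈ i) (hlt : ¬ Lfun (i.headD 0 + j) < t) :
    Lfun (i.headD 0 + j) = t := by
  obtain ⟨hs, hlen⟩ := mem_levels.1 hi
  have hmem : ((i.headD 0 + j) :: i) ∈ levels t := by
    rw [mem_levels]
    refine ⟨SChain.step hs hj, ?_⟩
    rw [List.length_cons, hlen]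
    omega
  have : HasChain (i.headD 0 + j) t := ⟨_, (mem_levels.1 hmem).1, (mem_levels.1 hmem).2, rfl⟩
  have := Lfun_min this
  omega

theorem innerA_spec (limit : Int) (t : Nat) (ht : 1 ≤ t) (i : List Int)
    (hi : i ∈ levels (t - 1)) :
    ∀ (js : List Int), js <:+ i → ∀ (tmp : List (List Int)) (F : Int → Bool),
    (∀ v, F v = true → Lfun v = t) → kSpec limit t F ≠ [] →
    (kSpec limit t (addF limit t (i.headD 0) js F) ≠ [] ∧
      innerA limit (t : Int) (i.headD 0) i js tmp (mSpec limit t F) (kSpec limit t F)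
        = ((js.map (fun j => (i.headD 0 + j) :: i)).reverse ++ tmp,
           mSpec limit t (addF limit t (i.headD 0) js F),
           kSpec limit t (addF limit t (i.headD 0) js F), false))
    ∨ (∃ tmp', innerA limit (t : Int) (i.headD 0) i js tmp (mSpec limit t F) (kSpec limit t F)
        = (tmp', mFinal limit, [], true)) := by
  obtain ⟨hs, hlen⟩ := mem_levels.1 hi
  have hpiv : 1 ≤ i.headD 0 := star_pos hs _ (star_head_mem hs)
  set p := i.headD 0 with hp
  intro js
  induction js with
  | nil =>
    intro _ tmp F hF hkne
    have hFeq : ∀ w ∈ keysL limit, addF limit t p [] F w = F w := by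
      intro w _; simp [addF]
    left
    refine ⟨by rwa [kSpec_congr hFeq], ?_⟩
    rw [innerA, kSpec_congr hFeq, mSpec_congr hFeq]
    simp
  | cons j rest ih =>
    intro hsuf tmp F hF hkne
    have hrest : rest <:+ i := (List.suffix_cons j rest).trans hsuf
    have hji : j ∈ i := hsuf.mem List.mem_cons_self
    have hj1 : 1 ≤ j := star_pos hs _ hji
    have hv2 : 2 ≤ p + j := by omega
    rw [innerA]
    by_cases hvl : p + j ≤ limit
    case neg =>
      -- pivot + j > limit: only tmp grows
      rw [if_neg hvl]
      have hvk : p + j ∉ keysL limit := by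
        rw [keysL, PySem.List.mem_pyRange_one]; omega
      have hFeq : ∀ w ∈ keysL limit,
          addF limit t p (j :: rest) F w = addF limit t p rest F w := by
        intro w hw
        simp only [addF, List.any_cons]
        by_cases hwv : w = p + j
        · exact absurd hw (hwv ▸ hvk)
        · rw [show (w == p + j) = false from beq_eq_false_iff_ne.2 hwv, Bool.false_or]
      rcases ih hrest (((p + j) :: i) :: tmp) F hF hkne with ⟨hk', heq⟩ | ⟨tmp', heq⟩
      · left
        refine ⟨by rwa [kSpec_congr hFeq], ?_⟩
        rw [kSpec_congr hFeq, mSpec_congr hFeq, heq]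
        simp
      · right
        exact ⟨tmp', heq⟩
    case pos =>
      rw [if_pos hvl]
      have hkey : p + j ∈ keysL limit := by
        rw [keysL, PySem.List.mem_pyRange_one]; omega
      have hget : PySem.Dict.get? (mSpec limit t F) (p + j)
          = some (mval t F (p + j)) := by
        rw [mSpec, get?_mk_map, if_pos hkey]
      by_cases hlt : Lfun (p + j) < t
      case pos =>
        -- already found at an earlier level: m[v] = Lfun v < t, not > l
        have hmv : mval t F (p + j) = some ((Lfun (p + j) : Nat) : Int) := by
          rw [mval, if_pos hlt]
        rw [hget, hmv]
        simp only []
        rw [if_neg (show ¬((decide ((t : Int) < ((Lfun (p + j) : Nat) : Int))) = true) from by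
          simp only [decide_eq_true_eq, not_lt]; exact_mod_cast Nat.le_of_lt hlt)]
        have hFeq : ∀ w ∈ keysL limit,
            addF limit t p (j :: rest) F w = addF limit t p rest F w := by
          intro w hw
          simp only [addF, List.any_cons]
          by_cases hwv : w = p + j
          · subst hwv
            rw [show (decide (Lfun (p + j) < t)) = true from decide_eq_true hlt]
            simp
          · rw [show (w == p + j) = false from beq_eq_false_iff_ne.2 hwv, Bool.false_or]
        rcases ih hrest (((p + j) :: i) :: tmp) F hF hkne with ⟨hk', heq⟩ | ⟨tmp', heq⟩
        · left
          refine ⟨by rwa [kSpec_congr hFeq], ?_⟩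
          rw [kSpec_congr hFeq, mSpec_congr hFeq, heq]
          simp
        · right
          exact ⟨tmp', heq⟩
      case neg =>
        by_cases hFv : F (p + j) = true
        case pos =>
          -- already found at THIS level: m[v] = t, not > l
          have hmv : mval t F (p + j) = some ((t : Nat) : Int) := by
            rw [mval, if_neg hlt, if_pos hFv]
          rw [hget, hmv]
          simp only []
          rw [if_neg (show ¬((decide ((t : Int) < ((t : Nat) : Int))) = true) from by simp)]
          have hFeq : ∀ w ∈ keysL limit,
              addF limit t p (j :: rest) F w = addF limit t p rest F w := by
            intro w hw
            simp only [addF, List.any_cons]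
            by_cases hwv : w = p + j
            · subst hwv
              simp [hFv]
            · rw [show (w == p + j) = false from beq_eq_false_iff_ne.2 hwv, Bool.false_or]
          rcases ih hrest (((p + j) :: i) :: tmp) F hF hkne with ⟨hk', heq⟩ | ⟨tmp', heq⟩
          · left
            refine ⟨by rwa [kSpec_congr hFeq], ?_⟩
            rw [kSpec_congr hFeq, mSpec_congr hFeq, heq]
            simp
          · right
            exact ⟨tmp', heq⟩
        case neg =>
          -- new value: m[v] = inf > l, assign level t and remove from k
          have hF0 : F (p + j) = false := by
            rcases Bool.eq_false_or_eq_true (F (p + j)) with h1 | h1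
            · exact absurd h1 hFv
            · exact h1
          have hmv : mval t F (p + j) = none := by
            rw [mval, if_neg hlt, if_neg hFv]
          rw [hget, hmv]
          simp only []
          rw [if_pos trivial]
          have hLv : Lfun (p + j) = t := new_value_level ht hi hji hlt
          -- the updated m is mSpec with F extended by p + j
          have hm2 : (mSpec limit t F).insert (p + j) (some ((t : Nat) : Int))
              = mSpec limit t (fun w => F w || (w == p + j)) := by
            rw [mSpec, insert_mk_map _ _ _ _ hkey, mSpec]
            congr 1
            apply List.map_congr_left
            intro w _
            by_cases hwv : w = p + j
            · subst hwv
              rw [if_pos rfl, mval, if_neg hlt, if_pos (by simp [hF0])]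
            · rw [if_neg hwv, mval, mval]
              rw [show (w == p + j) = false from beq_eq_false_iff_ne.2 hwv, Bool.or_false]
          -- the updated k is kSpec with F extended by p + j
          have hvink : p + j ∈ kSpec limit t F := by
            rw [kSpec, List.mem_filter]
            exact ⟨hkey, by simp [hlt, hF0]⟩
          have hknd : (kSpec limit t F).Nodup :=
            List.Nodup.filter _ (by rw [keysL]; exact PySem.List.nodup_pyRange_one _ _)
          have hk2 : (PySem.List.remove? (kSpec limit t F) (p + j)).getD (kSpec limit t F)
              = kSpec limit t (fun w => F w || (w == p + j)) := by
            rw [PySem.List.remove?_eq_some_erase _ _ hvink, Option.getD_some,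
              List.Nodup.erase_eq_filter hknd, kSpec, kSpec, List.filter_filter]
            apply List.filter_congr
            intro w _
            by_cases hwv : w = p + j
            · subst hwv
              simp [hlt, hF0]
            · rw [show (w == p + j) = false from beq_eq_false_iff_ne.2 hwv]
              simp [hwv]
          rw [hm2, hk2]
          have hF2 : ∀ w, (F w || (w == p + j)) = true → Lfun w = t := by
            intro w hw
            rcases (Bool.or_eq_true _ _ ▸ hw : F w = true ∨ (w == p + j) = true) with hw | hw
            · exact hF w hw
            · rw [show w = p + j by simpa using hw]
              exact hLv
          by_cases hk0 : kSpec limit t (fun w => F w || (w == p + j)) = []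
          case pos =>
            rw [if_pos hk0]
            right
            refine ⟨((p + j) :: i) :: tmp, ?_⟩
            rw [mSpec_eq_final hF2 hk0, hk0]
          case neg =>
            rw [if_neg hk0]
            have hFeq : ∀ w ∈ keysL limit,
                addF limit t p (j :: rest) F w
                  = addF limit t p rest (fun w => F w || (w == p + j)) w := by
              intro w hw
              simp only [addF, List.any_cons]
              by_cases hwv : w = p + j
              · subst hwv
                simp [hw, hlt]
              · rw [show (w == p + j) = false from beq_eq_false_iff_ne.2 hwv]
                simp
            rcases ih hrest (((p + j) :: i) :: tmp) _ hF2 hk0 with ⟨hk', heq⟩ | ⟨tmp', heq⟩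
            · left
              refine ⟨by rwa [kSpec_congr hFeq], ?_⟩
              rw [kSpec_congr hFeq, mSpec_congr hFeq, heq]
              simp
            · right
              exact ⟨tmp', heq⟩

theorem outerA_spec (limit : Int) (t : Nat) (ht : 1 ≤ t) :
    ∀ (cs : List (List Int)), (∀ c ∈ cs, c ∈ levels (t - 1)) →
    ∀ (tmp : List (List Int)) (F : Int → Bool),
    (∀ v, F v = true → Lfun v = t) → kSpec limit t F ≠ [] →
    (kSpec limit t (addFo limit t cs F) ≠ [] ∧
      outerA limit (t : Int) cs tmp (mSpec limit t F) (kSpec limit t F)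
        = ((expandA cs).reverse ++ tmp, mSpec limit t (addFo limit t cs F), kSpec limit t (addFo limit t cs F)))
    ∨ (∃ tmp', outerA limit (t : Int) cs tmp (mSpec limit t F) (kSpec limit t F)
        = (tmp', mFinal limit, [])) := by
  intro cs
  induction cs with
  | nil =>
    intro _ tmp F hF hkne
    have hFeq : ∀ w ∈ keysL limit, addFo limit t [] F w = F w := by
      intro w _; simp [addFo]
    left
    refine ⟨by rwa [kSpec_congr hFeq], ?_⟩
    rw [outerA, kSpec_congr hFeq, mSpec_congr hFeq]
    simp [expandA]
  | cons i rest ih =>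
    intro hcs tmp F hF hkne
    have hi : i ∈ levels (t - 1) := hcs i List.mem_cons_self
    have hrest : ∀ c ∈ rest, c ∈ levels (t - 1) := fun c hc => hcs c (List.mem_cons_of_mem _ hc)
    rw [outerA]
    have hFadd : ∀ v, addF limit t (i.headD 0) i F v = true → Lfun v = t := by
      intro v hv
      rcases (Bool.or_eq_true _ _ ▸ hv : F v = true ∨ _ = true) with hv | hv
      · exact hF v hv
      · rw [Bool.and_eq_true, Bool.and_eq_true] at hv
        obtain ⟨⟨_, hnlt⟩, hany⟩ := hv
        obtain ⟨j, hj, hw⟩ := List.any_eq_true.1 hany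
        have hveq : v = i.headD 0 + j := by simpa using hw
        subst hveq
        refine new_value_level ht hi hj ?_
        simp only [Bool.not_eq_true', decide_eq_false_iff_not] at hnlt
        exact hnlt
    rcases innerA_spec limit t ht i hi i (List.suffix_refl i) tmp F hF hkne with ⟨hk', heq⟩ | ⟨tmp', heq⟩
    · simp only [heq]
      rw [if_neg (show ¬(false = true) from by simp)]
      have hFeq : ∀ w ∈ keysL limit,
          addFo limit t (i :: rest) F w = addFo limit t rest (addF limit t (i.headD 0) i F) w := by
        intro w _
        simp only [addFo, addF, List.any_cons]
        rw [Bool.and_or_distrib_left, ← Bool.or_assoc]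
      rcases ih hrest ((List.map (fun j => (i.headD 0 + j) :: i) i).reverse ++ tmp) _ hFadd hk'
        with ⟨hk'', heq'⟩ | ⟨tmp'', heq'⟩
      · left
        refine ⟨by rwa [kSpec_congr hFeq], ?_⟩
        rw [kSpec_congr hFeq, mSpec_congr hFeq, heq']
        rw [show expandA (i :: rest)
            = List.map (fun j => (i.headD 0 + j) :: i) i ++ expandA rest from rfl,
          List.reverse_append, List.append_assoc]
      · right
        exact ⟨tmp'', heq'⟩
    · rw [heq]
      right
      exact ⟨tmp', rfl⟩

theorem level_spec (limit : Int) (t : Nat) (ht : 1 ≤ t)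
    (hkne : kSpec limit t (fun _ => false) ≠ []) :
    (kSpec limit (t + 1) (fun _ => false) ≠ [] ∧
      outerA limit (t : Int) (levels (t - 1)) [] (mSpec limit t (fun _ => false)) (kSpec limit t (fun _ => false))
        = ((levels t).reverse, mSpec limit (t + 1) (fun _ => false), kSpec limit (t + 1) (fun _ => false)))
    ∨ (∃ tmp', outerA limit (t : Int) (levels (t - 1)) [] (mSpec limit t (fun _ => false)) (kSpec limit t (fun _ => false))
        = (tmp', mFinal limit, [])) := by
  have hchar : ∀ w ∈ keysL limit,
      addFo limit t (levels (t - 1)) (fun _ => false) w = decide (Lfun w = t) := by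
    intro w hw
    have hw2 : 2 ≤ w := by
      rw [keysL, PySem.List.mem_pyRange_one] at hw
      omega
    simp only [addFo, Bool.false_or]
    by_cases heq : Lfun w = t
    · rw [decide_eq_true heq, decide_eq_true hw,
        show decide (Lfun w < t) = false from decide_eq_false (by omega)]
      have hhc : HasChain w t := heq ▸ Lfun_hasChain (by omega : (1:Int) ≤ w)
      obtain ⟨c, hsc, hlc, hhd⟩ := hhc
      have hcl : c ∈ levels t := mem_levels.2 ⟨hsc, hlc⟩
      rw [show t = (t - 1) + 1 from by omega, levels] at hcl
      obtain ⟨i, hi, j, hj, hceq⟩ := mem_expandA.1 hcl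
      have hany : (levels (t - 1)).any (fun i => i.any (fun j => w == i.headD 0 + j)) = true := by
        rw [List.any_eq_true]
        refine ⟨i, hi, List.any_eq_true.2 ⟨j, hj, ?_⟩⟩
        rw [hceq] at hhd
        simpa using hhd.symm
      rw [hany]
      rfl
    · rw [decide_eq_false heq]
      by_cases hlt : Lfun w < t
      · rw [decide_eq_true hlt]
        simp
      · rw [show decide (Lfun w < t) = false from decide_eq_false hlt]
        have hany : (levels (t - 1)).any (fun i => i.any (fun j => w == i.headD 0 + j)) = false := by
          rw [← Bool.not_eq_true, List.any_eq_true]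
          rintro ⟨i, hi, hj⟩
          obtain ⟨j, hj, hwj⟩ := List.any_eq_true.1 hj
          have : w = i.headD 0 + j := by simpa using hwj
          exact heq (this ▸ new_value_level ht hi hj (this ▸ hlt))
        rw [hany]
        simp
  have hmval : ∀ w ∈ keysL limit,
      mval t (fun w => decide (Lfun w = t)) w = mval (t + 1) (fun _ => false) w := by
    intro w _
    rw [mval, mval]
    by_cases h1 : Lfun w < t
    · rw [if_pos h1, if_pos (by omega)]
    · rw [if_neg h1]
      by_cases h2 : Lfun w = t
      · rw [if_pos (decide_eq_true h2), if_pos (by omega), h2]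
      · rw [if_neg (by simp [h2]), if_neg (by omega)]
        simp
  have hmeq : mSpec limit t (fun w => decide (Lfun w = t)) = mSpec limit (t + 1) (fun _ => false) := by
    unfold mSpec
    congr 1
    apply List.map_congr_left
    intro w hw
    rw [hmval w hw]
  have hkeq : kSpec limit t (fun w => decide (Lfun w = t)) = kSpec limit (t + 1) (fun _ => false) := by
    unfold kSpec
    apply List.filter_congr
    intro w _
    show (!decide (Lfun w < t) && !decide (Lfun w = t)) = (!decide (Lfun w < t + 1) && !false)
    by_cases h1 : Lfun w < t
    · rw [decide_eq_true h1, show decide (Lfun w < t + 1) = true from decide_eq_true (by omega)]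
      simp
    · by_cases h2 : Lfun w = t
      · rw [decide_eq_true h2, show decide (Lfun w < t + 1) = true from decide_eq_true (by omega)]
        simp
      · rw [show decide (Lfun w < t) = false from decide_eq_false h1,
          show decide (Lfun w < t + 1) = false from decide_eq_false (by omega),
          show decide (Lfun w = t) = false from decide_eq_false h2]
  have hexp : expandA (levels (t - 1)) = levels t := by
    conv_rhs => rw [show t = (t - 1) + 1 from by omega, levels]
  rcases outerA_spec limit t ht (levels (t - 1)) (fun c hc => hc) [] (fun _ => false)
      (by intro v hv; simp at hv) hkne with ⟨hk', heq⟩ | ⟨tmp', heq⟩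
  · left
    rw [kSpec_congr hchar, hkeq] at hk'
    refine ⟨hk', ?_⟩
    rw [heq, kSpec_congr hchar, hkeq, mSpec_congr hchar, hmeq, hexp]
    simp
  · right
    exact ⟨tmp', heq⟩

theorem loopA_nil (fuel : Nat) (limit l : Int) (ar : List (List Int))
    (m : PySem.Dict Int (Option Int)) : loopA fuel limit l ar m [] = m := by
  cases fuel <;> simp [loopA]

theorem loopA_spec (limit : Int) :
    ∀ (fuel t : Nat), 1 ≤ t → limit ≤ (t : Int) + (fuel : Int) →
      loopA fuel limit (t : Int) (levels (t - 1))
        (mSpec limit t (fun _ => false)) (kSpec limit t (fun _ => false)) = mFinal limit := by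
  intro fuel
  induction fuel with
  | zero =>
    intro t ht hle
    rw [loopA]
    refine mSpec_eq_final (by simp) ?_
    rw [kSpec, List.filter_eq_nil_iff]
    intro v hv
    rw [keysL, PySem.List.mem_pyRange_one] at hv
    have hLv := Lfun_le (by omega : (1:Int) ≤ v)
    have : Lfun v < t := by omega
    simp [this]
  | succ f ih =>
    intro t ht hle
    rw [loopA]
    by_cases hk : kSpec limit t (fun _ => false) = []
    · rw [if_pos hk]
      exact mSpec_eq_final (by simp) hk
    · rw [if_neg hk]
      rcases level_spec limit t ht hk with ⟨hk', heq⟩ | ⟨tmp', heq⟩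
      · rw [heq]
        have hcast : (t : Int) + 1 = ((t + 1 : Nat) : Int) := by push_cast; ring
        show loopA f limit ((t : Int) + 1) (levels t).reverse.reverse _ _ = _
        rw [List.reverse_reverse, hcast, show levels t = levels ((t + 1) - 1) from by simp]
        exact ih (t + 1) (by omega) (by push_cast at hle ⊢; omega)
      · rw [heq]
        show loopA f limit ((t : Int) + 1) tmp'.reverse (mFinal limit) [] = mFinal limit
        exact loopA_nil _ _ _ _ _

theorem kinit_eq (limit : Int) : keysL limit = kSpec limit 1 (fun _ => false) := by
  rw [kSpec]
  symm
  apply List.filter_eq_self.2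
  intro v hv
  have hv2 : 2 ≤ v := by
    rw [keysL, PySem.List.mem_pyRange_one] at hv
    omega
  have := Lfun_pos hv2
  simp
  omega

theorem m0_eq (limit : Int) :
    (keysL limit).foldl (fun d v => PySem.Dict.insert d v (none : Option Int)) PySem.Dict.empty
      = mSpec limit 1 (fun _ => false) := by
  apply PySem.Dict.ext
  rw [PySem.Dict.items_foldl_insert_fresh]
  · show _ = (keysL limit).map fun v => (v, mval 1 (fun _ => false) v)
    rw [show (PySem.Dict.empty : PySem.Dict Int (Option Int)).items = [] from rfl, List.nil_append]
    apply List.map_congr_left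
    intro v hv
    have hv2 : 2 ≤ v := by
      rw [keysL, PySem.List.mem_pyRange_one] at hv
      omega
    have h1 := Lfun_pos hv2
    rw [mval, if_neg (by omega), if_neg (by simp)]
  · intro a _
    exact PySem.Dict.contains_empty a
  · show ((keysL limit).map (fun a => a)).Nodup
    rw [List.map_id', keysL]
    exact PySem.List.nodup_pyRange_one _ _

-- ===== VERDICT (by name: the statement is the Claim_ definition above) =====
theorem minimum_products_spec : Claim_equal_minimum_products := by
  intro limit _
  show minimum_products limit = minimum_products_alt limit
  rw [minimum_products, minimum_products_alt,
    show PySem.List.pyRange 2 (limit + 1) 1 = keysL limit from rfl]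
  have hfold : loopA limit.toNat limit 1 [[1]]
      ((keysL limit).foldl (fun d v => PySem.Dict.insert d v (none : Option Int)) PySem.Dict.empty)
      (keysL limit) = mFinal limit := by
    rw [m0_eq]
    conv_lhs => rw [kinit_eq]
    rw [show ([[1]] : List (List Int)) = levels (1 - 1) from rfl,
      show (1 : Int) = ((1 : Nat) : Int) from rfl]
    exact loopA_spec limit limit.toNat 1 (le_refl 1) (by omega)
  rw [hfold,
    show (mFinal limit).items = (keysL limit).map (fun v => (v, some ((Lfun v : Nat) : Int))) from rfl,
    PySem.List.foldl_add, PySem.List.foldl_add, List.map_map]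
  congr 1
  refine congrArg List.sum (List.map_congr_left ?_)
  intro v hv
  have hv2 : 2 ≤ v := by
    rw [keysL, PySem.List.mem_pyRange_one] at hv
    omega
  show ((some ((Lfun v : Nat) : Int)).getD 0) = searchB v v.toNat 1
  rw [searchB_Lfun hv2, Option.getD_some]
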